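-- pv_equiv track=rewrite | github.com/pyranges/pyranges | pyranges/tostring2.py | hidden_columns_info
-- ===== SOURCE A (Python) =====
-- def hidden_columns_info(hidden_columns, str_repr_width):
--     n_hidden_cols = len(hidden_columns)
--     _hstr = ""
--     if n_hidden_cols:
--         hstr = str(n_hidden_cols) + " hidden columns: {}"
--         for i in range(n_hidden_cols + 1):
--             _hstr = hstr.format(", ".join(hidden_columns[:i]))
--             if len(_hstr) > str_repr_width:
--                 break
--
--         if i < n_hidden_cols:
--             hidden_columns = hidden_columns[:i]
--             hidden_columns.append("...")
--
--             _hstr = hstr.format(", ".join(hidden_columns)) + " (+ {} more.)".format(n_hidden_cols - i)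
--
--     return _hstr
-- ===== SOURCE B (Python) =====
-- def hidden_columns_info(hidden_columns, str_repr_width):
--     n = len(hidden_columns)
--     if n == 0:
--         return ""
--     prefix = str(n) + " hidden columns: "
--     base = len(prefix)
--     # find cutoff by running lengths only (never re-joins prefixes)
--     if base > str_repr_width:
--         cut = 0
--     else:
--         cut = n
--         total = base
--         for i, col in enumerate(hidden_columns):
--             total += len(col) + (2 if i else 0)
--             if total > str_repr_width:
--                 cut = i + 1
--                 break
--     if cut < n:
--         shown = hidden_columns[:cut] + ["..."]
--         return prefix + ", ".join(shown) + " (+ {} more.)".format(n - cut)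
--     return prefix + ", ".join(hidden_columns)
-- ===== Notes on version B (the rewrite author's own statement) =====
-- stated objective: faster
-- what changed: A re-joins and re-formats every prefix of the hidden-column names (quadratic in total characters); B computes the cutoff index with a single pass over running name lengths and joins only once.
import Mathlib
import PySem

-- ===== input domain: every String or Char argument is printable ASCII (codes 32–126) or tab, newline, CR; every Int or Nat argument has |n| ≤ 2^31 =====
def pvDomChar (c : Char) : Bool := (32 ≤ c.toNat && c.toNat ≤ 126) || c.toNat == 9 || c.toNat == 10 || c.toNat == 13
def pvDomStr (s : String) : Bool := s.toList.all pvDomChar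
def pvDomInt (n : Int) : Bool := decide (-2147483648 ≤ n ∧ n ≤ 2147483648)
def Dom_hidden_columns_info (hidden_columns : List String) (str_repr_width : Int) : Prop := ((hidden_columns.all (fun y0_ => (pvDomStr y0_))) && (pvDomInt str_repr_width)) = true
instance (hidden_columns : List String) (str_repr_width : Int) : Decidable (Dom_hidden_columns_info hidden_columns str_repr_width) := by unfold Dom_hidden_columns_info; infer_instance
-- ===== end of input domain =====

-- B replaces A's quadratic prefix re-joining by a single pass over running name lengths; equal output on all inputs.

-- ===== PORT A =====
-- A's loop body: at iteration i it formats the first i names and checks the width (the Bool is the break flag).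
def hciF (cols : List String) (w : Int) (pre : String) :
    (String × Int × Bool) → Int → (String × Int × Bool) :=
  fun st i =>
    if st.2.2 then st
    else
      let h := pre ++ PySem.Str.join ", " (PySem.List.slice cols none (some i))
      if PySem.Str.len h > w then (h, i, true) else (h, i, false)

def hidden_columns_info (hidden_columns : List String) (str_repr_width : Int) : String :=
  let n_hidden_cols : Int := PySem.List.len hidden_columns
  let _hstr : String := ""
  if n_hidden_cols ≠ 0 then
    -- hstr = str(n) + " hidden columns: {}"; hstr.format(x) = str(n) ++ " hidden columns: " ++ x
    let pre : String := PySem.Int.toStr n_hidden_cols ++ " hidden columns: "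
    let st := (PySem.List.pyRange 0 (n_hidden_cols + 1) 1).foldl
        (hciF hidden_columns str_repr_width pre) (_hstr, 0, false)
    let i := st.2.1
    if i < n_hidden_cols then
      let hc := PySem.List.slice hidden_columns none (some i) ++ ["..."]
      pre ++ PySem.Str.join ", " hc ++ " (+ " ++ PySem.Int.toStr (n_hidden_cols - i) ++ " more.)"
    else st.1
  else _hstr

-- ===== PORT B =====
-- B's for-with-break over (index, name): returns some cut at the first overflow of the running length, none otherwise.
def hciScan (cols : List String) (i : Nat) (total w : Int) : Option Nat :=
  match cols with
  | [] => none
  | c :: rest =>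
    let total' := total + PySem.Str.len c + (if i ≠ 0 then 2 else 0)
    if total' > w then some (i + 1)
    else hciScan rest (i + 1) total' w

def hidden_columns_info_alt (hidden_columns : List String) (str_repr_width : Int) : String :=
  let n := hidden_columns.length
  if n = 0 then ""
  else
    let pfx := PySem.Int.toStr (n : Int) ++ " hidden columns: "
    let base := PySem.Str.len pfx
    let cut : Nat :=
      if base > str_repr_width then 0
      else (hciScan hidden_columns 0 base str_repr_width).getD n
    if cut < n then
      pfx ++ PySem.Str.join ", " (hidden_columns.take cut ++ ["..."]) ++
        " (+ " ++ PySem.Int.toStr ((n : Int) - (cut : Int)) ++ " more.)"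
    else pfx ++ PySem.Str.join ", " hidden_columns

-- ===== PRECONDITION & SPEC =====
def Spec_hidden_columns_info (hidden_columns : List String) (str_repr_width : Int) (out : String) : Prop := out = hidden_columns_info_alt hidden_columns str_repr_width
instance (hidden_columns : List String) (str_repr_width : Int) (out : String) : Decidable (Spec_hidden_columns_info hidden_columns str_repr_width out) := by unfold Spec_hidden_columns_info; infer_instance

-- ===== CLAIM (what is proved, stated in full; the proofs are below) =====
def Claim_equal_hidden_columns_info : Prop := ∀ (hidden_columns : List String) (str_repr_width : Int), Dom_hidden_columns_info hidden_columns str_repr_width → Spec_hidden_columns_info hidden_columns str_repr_width (hidden_columns_info hidden_columns str_repr_width)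

-- ===== LEMMAS AND PROOFS =====

-- the string A formats at iteration i
def hciStrAt (pre : String) (cols : List String) (i : Nat) : String :=
  pre ++ PySem.Str.join ", " (cols.take i)

lemma hci_done_stable (cols : List String) (w : Int) (pre : String) (l : List Int)
    (h : String) (i : Int) :
    l.foldl (hciF cols w pre) (h, i, true) = (h, i, true) := by
  induction l with
  | nil => rfl
  | cons a t ih => simpa [hciF] using ih

lemma hci_chars_join_snoc (sep c : List Char) (l : List (List Char)) :
    PySem.Chars.join sep (l ++ [c]) =
      if l = [] then c else PySem.Chars.join sep l ++ sep ++ c := by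
  induction l with
  | nil => simp [PySem.Chars.join_singleton]
  | cons a t ih =>
    cases t with
    | nil => simp [PySem.Chars.join_cons_cons, PySem.Chars.join_singleton]
    | cons b u =>
      have h1 : (a :: b :: u) ++ [c] = a :: ((b :: u) ++ [c]) := rfl
      have h2 : (b :: u) ++ [c] = b :: (u ++ [c]) := rfl
      rw [h1, h2, PySem.Chars.join_cons_cons, ← h2, ih]
      simp [PySem.Chars.join_cons_cons, List.append_assoc]

lemma hci_join_snoc (sep c : String) (l : List String) :
    PySem.Str.join sep (l ++ [c]) =
      if l = [] then c else PySem.Str.join sep l ++ sep ++ c := by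
  cases l with
  | nil =>
    rw [if_pos rfl, ← String.toList_inj]
    simp [PySem.Str.toList_join, PySem.Chars.join_singleton]
  | cons a t =>
    rw [if_neg (List.cons_ne_nil a t), ← String.toList_inj]
    simp only [PySem.Str.toList_join, String.toList_append, List.map_append, List.map_cons,
      List.map_nil, List.cons_append]
    rw [show String.toList a :: (List.map String.toList t ++ [String.toList c]) =
        (String.toList a :: List.map String.toList t) ++ [String.toList c] from rfl,
      hci_chars_join_snoc]
    rw [if_neg (by simp)]

lemma hci_join_nil (sep : String) : PySem.Str.join sep [] = "" := by
  rw [← String.toList_inj]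
  simp [PySem.Str.toList_join, PySem.Chars.join_nil]

lemma hci_strAt_zero (pre : String) (cols : List String) :
    hciStrAt pre cols 0 = pre := by
  simp [hciStrAt, hci_join_nil]

lemma hci_len_strAt_succ (pre c : String) (cols pfx rest : List String)
    (hc : cols = pfx ++ c :: rest) :
    PySem.Str.len (hciStrAt pre cols (pfx.length + 1)) =
      PySem.Str.len (hciStrAt pre cols pfx.length) + PySem.Str.len c +
        (if pfx.length ≠ 0 then 2 else 0) := by
  subst hc
  have h1 : (pfx ++ c :: rest).take (pfx.length + 1) = pfx ++ [c] := by
    rw [List.take_append, List.take_of_length_le (by omega), Nat.add_sub_cancel_left]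
    rfl
  have h2 : (pfx ++ c :: rest).take pfx.length = pfx := List.take_left
  rw [hciStrAt, hciStrAt, h1, h2, hci_join_snoc]
  cases pfx with
  | nil =>
    simp [hci_join_nil, PySem.Str.len_eq]
  | cons a t =>
    rw [if_neg (List.cons_ne_nil a t), if_pos (by simp : (a :: t).length ≠ 0)]
    simp only [PySem.Str.len_append]
    have hsep : PySem.Str.len ", " = 2 := by decide
    rw [hsep]
    ring

lemma hci_scan_bounds (l : List String) :
    ∀ (i : Nat) (t w : Int) (m : Nat), hciScan l i t w = some m → i < m ∧ m ≤ i + l.length := by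
  induction l with
  | nil => intro i t w m h; simp [hciScan] at h
  | cons c r ih =>
    intro i t w m h
    simp only [hciScan] at h
    by_cases hgt : t + PySem.Str.len c + (if i ≠ 0 then 2 else 0) > w
    · rw [if_pos hgt] at h
      obtain rfl : i + 1 = m := by simpa using h
      simp only [List.length_cons]
      omega
    · rw [if_neg hgt] at h
      have := ih (i + 1) _ w m h
      simp only [List.length_cons]
      omega

lemma hci_loop_eq_scan (cols : List String) (w : Int) (pre : String) :
    ∀ (rest pfx : List String), cols = pfx ++ rest →
    (PySem.List.pyRange ((pfx.length : Int) + 1) ((cols.length : Int) + 1) 1).foldl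
        (hciF cols w pre) (hciStrAt pre cols pfx.length, (pfx.length : Int), false)
      = match hciScan rest pfx.length
            (PySem.Str.len (hciStrAt pre cols pfx.length)) w with
        | some m => (hciStrAt pre cols m, (m : Int), true)
        | none => (hciStrAt pre cols cols.length, (cols.length : Int), false) := by
  intro rest
  induction rest with
  | nil =>
    intro pfx hc
    have hn : cols.length = pfx.length := by simp [hc]
    rw [PySem.List.pyRange_one_eq_nil (by omega)]
    simp [hciScan, hn]
  | cons c rest' ih =>
    intro pfx hc
    have hlen : cols.length = pfx.length + rest'.length + 1 := by simp [hc]; omega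
    have hlt : (pfx.length : Int) + 1 < (cols.length : Int) + 1 := by
      push_cast [hlen]; omega
    rw [PySem.List.pyRange_one_cons hlt, List.foldl_cons]
    have hslice : PySem.List.slice cols none (some ((pfx.length : Int) + 1)) =
        cols.take (pfx.length + 1) := by
      have := PySem.List.slice_to_natCast cols (pfx.length + 1)
      push_cast at this
      exact this
    have hstep : pre ++ PySem.Str.join ", "
          (PySem.List.slice cols none (some ((pfx.length : Int) + 1))) =
        hciStrAt pre cols (pfx.length + 1) := by
      rw [hslice]; rfl
    have hl := hci_len_strAt_succ pre c cols pfx rest' hc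
    by_cases hgt : PySem.Str.len (hciStrAt pre cols (pfx.length + 1)) > w
    · have hf : hciF cols w pre (hciStrAt pre cols pfx.length, (pfx.length : Int), false)
          ((pfx.length : Int) + 1)
          = (hciStrAt pre cols (pfx.length + 1), ((pfx.length : Int) + 1), true) := by
        simp only [hciF]
        rw [if_neg (by simp), hstep, if_pos hgt]
      rw [hf, hci_done_stable]
      have hscan : hciScan (c :: rest') pfx.length
          (PySem.Str.len (hciStrAt pre cols pfx.length)) w = some (pfx.length + 1) := by
        simp only [hciScan]
        rw [if_pos (by omega)]
      rw [hscan]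
      simp
    · have hf : hciF cols w pre (hciStrAt pre cols pfx.length, (pfx.length : Int), false)
          ((pfx.length : Int) + 1)
          = (hciStrAt pre cols (pfx.length + 1), ((pfx.length : Int) + 1), false) := by
        simp only [hciF]
        rw [if_neg (by simp), hstep, if_neg hgt]
      rw [hf]
      have hih := ih (pfx ++ [c]) (by simp [hc])
      have hlen2 : (pfx ++ [c]).length = pfx.length + 1 := by simp
      rw [hlen2] at hih
      push_cast at hih ⊢
      rw [hih]
      have hscan : hciScan (c :: rest') pfx.length
          (PySem.Str.len (hciStrAt pre cols pfx.length)) w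
          = hciScan rest' (pfx.length + 1)
              (PySem.Str.len (hciStrAt pre cols (pfx.length + 1))) w := by
        simp only [hciScan]
        rw [if_neg (by omega)]
        congr 1
        omega
      rw [hscan]

-- ===== VERDICT (by name: the statement is the Claim_ definition above) =====
theorem hidden_columns_info_spec : Claim_equal_hidden_columns_info := by
  unfold Claim_equal_hidden_columns_info Spec_hidden_columns_info
  intro cols w _
  by_cases hc : cols = []
  · subst hc
    simp [hidden_columns_info, hidden_columns_info_alt, PySem.List.len]
  · have hn : 0 < cols.length := List.length_pos_iff.mpr hc
    have hne : ((cols.length : Int)) ≠ 0 := by omega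
    simp only [hidden_columns_info, hidden_columns_info_alt, PySem.List.len_eq]
    rw [if_pos hne, if_neg (by omega : ¬ cols.length = 0)]
    set pre := PySem.Int.toStr (cols.length : Int) ++ " hidden columns: " with hpre
    have h0 : PySem.List.pyRange 0 ((cols.length : Int) + 1) 1
        = 0 :: PySem.List.pyRange 1 ((cols.length : Int) + 1) 1 :=
      PySem.List.pyRange_one_cons (by omega)
    rw [h0, List.foldl_cons]
    have hsl0 : PySem.List.slice cols none (some (0 : Int)) = cols.take 0 := by
      have := PySem.List.slice_to_natCast cols 0
      simpa using this
    have hlen0 : PySem.Str.len (hciStrAt pre cols 0) = PySem.Str.len pre := by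
      rw [hci_strAt_zero]
    by_cases hb : PySem.Str.len pre > w
    · have hf : hciF cols w pre ("", 0, false) 0 = (hciStrAt pre cols 0, (0 : Int), true) := by
        simp only [hciF]
        rw [if_neg (by simp), hsl0,
          show pre ++ PySem.Str.join ", " (cols.take 0) = hciStrAt pre cols 0 from rfl,
          if_pos (by rw [hlen0]; exact hb)]
      rw [hf, hci_done_stable]
      rw [if_pos (by omega : (0 : Int) < (cols.length : Int))]
      rw [if_pos hb, if_pos hn, hsl0]
      norm_num
    · have hf : hciF cols w pre ("", 0, false) 0 = (hciStrAt pre cols 0, (0 : Int), false) := by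
        simp only [hciF]
        rw [if_neg (by simp), hsl0,
          show pre ++ PySem.Str.join ", " (cols.take 0) = hciStrAt pre cols 0 from rfl,
          if_neg (by rw [hlen0]; exact hb)]
      rw [hf]
      have hloop := hci_loop_eq_scan cols w pre cols [] rfl
      simp only [List.length_nil, Nat.cast_zero, zero_add, hlen0] at hloop
      rw [hloop, if_neg hb]
      cases hsc : hciScan cols 0 (PySem.Str.len pre) w with
      | none =>
        simp only [Option.getD_none]
        rw [if_neg (lt_irrefl _), if_neg (lt_irrefl _)]
        simp [hciStrAt, List.take_length]
      | some m =>
        have hmb := hci_scan_bounds cols 0 (PySem.Str.len pre) w m hsc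
        simp only [Option.getD_some]
        by_cases hm : m < cols.length
        · rw [if_pos (by exact_mod_cast hm), if_pos hm]
          rw [PySem.List.slice_to_natCast cols m]
        · rw [if_neg (by exact_mod_cast hm), if_neg hm]
          have hmn : m = cols.length := by omega
          subst hmn
          simp [hciStrAt, List.take_length]
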